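-- pv_equiv track=rewrite | github.com/L2-Regulasyon/Teknofest2023 | src/utils/preprocess_utils.py | special_lowercase
-- ===== SOURCE A (Python) =====
-- def special_lowercase(x):
--     """
--     Add special token if text contains upper chars.
--
--     ---------
--     param x: Text
--     return: Adjusted text
--     """
--     chars = []
--     for char in x:
--         if char.lower() != char:
--             chars.append("# ")
--             chars.append(char.lower())
--         else:
--             chars.append(char.lower())
--     return "".join(chars)
-- ===== SOURCE B (Python) =====
-- def special_lowercase(x):
--     """Table-driven rewrite: build a translate table for cased chars, one pass via str.translate."""
--     table = {ord(c): "# " + c.lower() for c in set(x) if c.lower() != c}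
--     return x.translate(table)
-- ===== Notes on version B (the rewrite author's own statement) =====
-- stated objective: idiomatic
-- what changed: Replaces the per-character list-append-and-join loop with a translation table built once over the distinct cased characters, applied in a single C-level str.translate pass.
import Mathlib
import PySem

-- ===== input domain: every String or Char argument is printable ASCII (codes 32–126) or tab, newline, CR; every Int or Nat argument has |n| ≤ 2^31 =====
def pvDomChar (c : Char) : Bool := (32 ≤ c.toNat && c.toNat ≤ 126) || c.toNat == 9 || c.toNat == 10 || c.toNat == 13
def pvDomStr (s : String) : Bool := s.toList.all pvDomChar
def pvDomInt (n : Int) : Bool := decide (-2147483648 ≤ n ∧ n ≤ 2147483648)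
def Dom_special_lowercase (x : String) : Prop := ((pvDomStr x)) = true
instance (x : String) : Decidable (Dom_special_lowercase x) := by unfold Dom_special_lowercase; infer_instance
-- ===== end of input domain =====

-- B replaces A's append/join loop by a translation table over the distinct cased characters, applied with str.translate (idiomatic; measurably faster by constant factor).

-- ===== PORT A =====
-- A: build a list of string pieces char by char, then "".join (pieces kept as List Char, join = flatten).
def special_lowercase (x : String) : String :=
  String.ofList ((x.toList.foldl (fun chars c =>
    if PySem.Chars.lowerChar c ≠ c then
      (chars ++ [['#', ' ']]) ++ [[PySem.Chars.lowerChar c]]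
    else
      chars ++ [[PySem.Chars.lowerChar c]]) ([] : List (List Char))).flatten)

-- ===== PORT B =====
-- B: dict comprehension {ord(c): "# " + c.lower() for c in set(x) if c.lower() != c}, then x.translate(table)
-- (table keyed by the Char itself; values as List Char; translate = per-char table lookup, default the char itself).
def special_lowercase_alt (x : String) : String :=
  let table : PySem.Dict Char (List Char) :=
    (PySem.Set.ofList x.toList).foldl
      (fun d c => if PySem.Chars.lowerChar c ≠ c then
          d.insert c ['#', ' ', PySem.Chars.lowerChar c]
        else d)
      PySem.Dict.empty
  String.ofList (x.toList.flatMap (fun c => table.getD c [c]))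

-- ===== PRECONDITION & SPEC =====
def Spec_special_lowercase (x : String) (out : String) : Prop := out = special_lowercase_alt x
instance (x : String) (out : String) : Decidable (Spec_special_lowercase x out) := by unfold Spec_special_lowercase; infer_instance

-- ===== CLAIM (what is proved, stated in full; the proofs are below) =====
def Claim_equal_special_lowercase : Prop := ∀ (x : String), Dom_special_lowercase x → Spec_special_lowercase x (special_lowercase x)

-- ===== LEMMAS AND PROOFS =====

-- A's loop, characterised as a flatMap.
theorem pvA_flatten (L : List Char) (acc : List (List Char)) :
    (L.foldl (fun chars c =>
      if PySem.Chars.lowerChar c ≠ c then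
        (chars ++ [['#', ' ']]) ++ [[PySem.Chars.lowerChar c]]
      else
        chars ++ [[PySem.Chars.lowerChar c]]) acc).flatten
    = acc.flatten ++ L.flatMap (fun c =>
        if PySem.Chars.lowerChar c ≠ c then ['#', ' ', PySem.Chars.lowerChar c]
        else [PySem.Chars.lowerChar c]) := by
  induction L generalizing acc with
  | nil => simp
  | cons c L ih =>
    rw [List.foldl_cons]
    by_cases h : PySem.Chars.lowerChar c ≠ c
    · rw [if_pos h, ih, List.flatMap_cons, if_pos h]
      simp [List.flatten_append]
    · rw [if_neg h, ih, List.flatMap_cons, if_neg h]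
      simp [List.flatten_append]

theorem pvTable_getD (L : List Char) (d : PySem.Dict Char (List Char)) (k : Char) :
    (L.foldl (fun d c => if PySem.Chars.lowerChar c ≠ c then
        d.insert c ['#', ' ', PySem.Chars.lowerChar c]
      else d) d).getD k [k]
    = if k ∈ L ∧ PySem.Chars.lowerChar k ≠ k then ['#', ' ', PySem.Chars.lowerChar k]
      else d.getD k [k] := by
  induction L generalizing d with
  | nil => simp
  | cons c L ih =>
    rw [List.foldl_cons, ih]
    by_cases hc : PySem.Chars.lowerChar c ≠ c
    · rw [if_pos hc]
      by_cases hk : k ∈ L ∧ PySem.Chars.lowerChar k ≠ k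
      · simp [hk, List.mem_cons]
      · rw [if_neg hk, PySem.Dict.getD_insert]
        by_cases hkc : k = c
        · subst hkc; simp [hc]
        · simp only [if_neg hkc]
          rw [if_neg]
          intro h
          exact absurd ⟨(List.mem_cons.mp h.1).resolve_left hkc, h.2⟩ hk
    · rw [if_neg hc]
      by_cases hk : k ∈ L ∧ PySem.Chars.lowerChar k ≠ k
      · simp [hk, List.mem_cons]
      · rw [if_neg hk, if_neg]
        intro h
        rcases List.mem_cons.mp h.1 with h1 | h1
        · subst h1; exact hc h.2
        · exact hk ⟨h1, h.2⟩

-- flatMap congruence over membership.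
theorem pvFlatMap_congr {α β : Type} (L : List α) (f g : α → List β)
    (h : ∀ c ∈ L, f c = g c) : L.flatMap f = L.flatMap g := by
  induction L with
  | nil => rfl
  | cons c L ih =>
    simp only [List.flatMap_cons, h c (List.mem_cons_self), ih (fun a ha => h a (List.mem_cons_of_mem _ ha))]

-- ===== VERDICT (by name: the statement is the Claim_ definition above) =====
theorem special_lowercase_spec : Claim_equal_special_lowercase := by
  intro x _
  unfold Spec_special_lowercase special_lowercase special_lowercase_alt
  rw [pvA_flatten]
  simp only [List.flatten_nil, List.nil_append]
  congr 1
  apply pvFlatMap_congr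
  intro c hc
  rw [pvTable_getD]
  by_cases h : PySem.Chars.lowerChar c ≠ c
  · simp [hc, h]
  · simp [not_not.mp h]
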